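-- pv_equiv track=rewrite | github.com/gabrielofavero/Trip-Viewer-Firebase | readme.py | calculate_version
-- ===== SOURCE A (Python) =====
-- def calculate_version(tasks):
--     """Calculate semantic version based on completed tasks (chronological order)."""
--     done_tasks = tasks['done']
--
--     done_tasks_reversed = list(reversed(done_tasks))
--
--     major = 2
--     minor = 0
--
--     for task in done_tasks_reversed:
--         if task['type'] == 'E':
--             major += 1
--             minor = 0
--         else:
--             minor += 1
--
--     return f"{major}.{minor}.0"
-- ===== SOURCE B (Python) =====
-- def calculate_version(tasks):
--     """Calculate semantic version based on completed tasks (chronological order)."""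
--     done_tasks = tasks['done']
--     major = 2 + sum(1 for task in done_tasks if task['type'] == 'E')
--     minor = 0
--     for task in done_tasks:
--         if task['type'] == 'E':
--             break
--         minor += 1
--     return f"{major}.{minor}.0"
-- ===== Notes on version B (the rewrite author's own statement) =====
-- stated objective: simpler
-- what changed: Replaces A's single reversed-list accumulator loop (minor reset on each 'E') by two independent passes in chronological order: major = 2 + a full count of 'E' tasks, minor = a forward scan that breaks at the first 'E'.
import Mathlib
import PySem

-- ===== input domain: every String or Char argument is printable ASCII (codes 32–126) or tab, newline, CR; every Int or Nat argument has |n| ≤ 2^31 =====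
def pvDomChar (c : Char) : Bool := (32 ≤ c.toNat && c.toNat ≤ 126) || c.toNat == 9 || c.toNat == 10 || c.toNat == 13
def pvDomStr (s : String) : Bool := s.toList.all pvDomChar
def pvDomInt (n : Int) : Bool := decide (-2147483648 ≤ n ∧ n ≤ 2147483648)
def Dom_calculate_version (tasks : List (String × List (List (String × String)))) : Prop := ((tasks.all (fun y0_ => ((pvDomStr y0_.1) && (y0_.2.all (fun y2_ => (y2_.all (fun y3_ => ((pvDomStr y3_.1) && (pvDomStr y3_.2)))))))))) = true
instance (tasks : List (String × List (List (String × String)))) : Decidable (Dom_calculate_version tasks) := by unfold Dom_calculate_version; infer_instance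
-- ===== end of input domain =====

-- B replaces A's reversed single-accumulator loop by two independent passes (a full count of
-- 'E' tasks for major, and a forward scan that stops at the first 'E' for minor): simpler, same cost.

-- ===== PORT A =====
-- task['type'] as a total helper; Pre_ guarantees the key is present, so getD "" is never hit inside Pre_.
def pvTypeOf (task : List (String × String)) : String := (task.lookup "type").getD ""

def calculate_version (tasks : List (String × List (List (String × String)))) : String :=
  match tasks.lookup "done" with
  | none => ""   -- KeyError in Python; excluded by Pre_
  | some done_tasks =>
    let done_tasks_reversed := done_tasks.reverse
    let p : Int × Int := done_tasks_reversed.foldl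
      (fun (p : Int × Int) task =>
        if pvTypeOf task == "E" then (p.1 + 1, 0) else (p.1, p.2 + 1))
      (2, 0)
    PySem.Int.toStr p.1 ++ "." ++ PySem.Int.toStr p.2 ++ ".0"

-- ===== PORT B =====
-- the for-loop with `break`: count non-'E' tasks until the first 'E'
def pvMinorB : List (List (String × String)) → Int
  | [] => 0
  | task :: rest => if pvTypeOf task == "E" then 0 else pvMinorB rest + 1

def calculate_version_alt (tasks : List (String × List (List (String × String)))) : String :=
  match tasks.lookup "done" with
  | none => ""   -- KeyError in Python; excluded by Pre_
  | some done_tasks =>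
    let major : Int := 2 + (done_tasks.countP (fun task => pvTypeOf task == "E") : Int)
    PySem.Int.toStr major ++ "." ++ PySem.Int.toStr (pvMinorB done_tasks) ++ ".0"

-- ===== PRECONDITION & SPEC =====
-- Pre_ excludes exactly the inputs where Python raises KeyError: no 'done' key, or a done task without a 'type' key.
def Pre_calculate_version (tasks : List (String × List (List (String × String)))) : Prop :=
  (tasks.lookup "done").isSome = true ∧
  (((tasks.lookup "done").getD []).all (fun task => (task.lookup "type").isSome)) = true
instance (tasks : List (String × List (List (String × String)))) : Decidable (Pre_calculate_version tasks) := by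
  unfold Pre_calculate_version; infer_instance

def pvWitness_calculate_version : (List (String × List (List (String × String)))) :=
  [("done", [[("type", "F")], [("type", "E")], [("type", "B")]])]

def Spec_calculate_version (tasks : List (String × List (List (String × String)))) (out : String) : Prop := out = calculate_version_alt tasks
instance (tasks : List (String × List (List (String × String)))) (out : String) : Decidable (Spec_calculate_version tasks out) := by unfold Spec_calculate_version; infer_instance

-- ===== CLAIM (what is proved, stated in full; the proofs are below) =====
def Claim_equal_calculate_version : Prop := ∀ (tasks : List (String × List (List (String × String)))), Dom_calculate_version tasks → Pre_calculate_version tasks → Spec_calculate_version tasks (calculate_version tasks)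

-- ===== LEMMAS AND PROOFS =====

-- A's fold over the reversed list computes (2 + #E, length of the non-'E' prefix).
theorem pv_fold_reverse (l : List (List (String × String))) :
    l.reverse.foldl
      (fun (p : Int × Int) task =>
        if pvTypeOf task == "E" then (p.1 + 1, 0) else (p.1, p.2 + 1))
      (2, 0)
    = (2 + (l.countP (fun task => pvTypeOf task == "E") : Int), pvMinorB l) := by
  induction l with
  | nil => simp [pvMinorB]
  | cons x l ih =>
      simp only [List.reverse_cons, List.foldl_append, List.foldl_cons, List.foldl_nil, ih,
        List.countP_cons, pvMinorB]
      by_cases h : pvTypeOf x == "E"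
      · simp [h]; ring
      · simp [h]

-- ===== VERDICT (by name: the statement is the Claim_ definition above) =====
theorem calculate_version_spec : Claim_equal_calculate_version := by
  intro tasks _ _
  unfold Spec_calculate_version calculate_version calculate_version_alt
  cases h : tasks.lookup "done" with
  | none => rfl
  | some done =>
      dsimp only
      rw [pv_fold_reverse]
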